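-- pv_equiv track=rewrite | github.com/shf/inpToXML | inpToXMP.py | _read_element_keywords
-- ===== SOURCE A (Python) =====
-- def _read_element_keywords(cell_sets, l):
--
--     # Get element type and element set name
--     element_type = None
--     element_set_name = None
--     for key in l[1:]:
--         key_parts = key.split('=')
--         key_name = key_parts[0].lower().strip()
--         if key_name == "type":
--             element_type = key_parts[1].lower().strip()
--         elif key_name == "elset":
--             element_set_name = key_parts[1].strip()
--
--     # Add empty set to cell_sets dictionary
--     if element_set_name:
--         if element_set_name not in cell_sets:
--             cell_sets[element_set_name] = set()
--
--     return element_type, element_set_name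
-- ===== SOURCE B (Python) =====
-- def _read_element_keywords(cell_sets, l):
--     # One pass building a keyword dict (last occurrence wins, like A's overwrite),
--     # then derive the two results from the dict afterwards.
--     kw = {}
--     for key in l[1:]:
--         parts = key.split('=')
--         kw[parts[0].lower().strip()] = parts
--
--     element_type = None
--     element_set_name = None
--     if 'type' in kw:
--         element_type = kw['type'][1].lower().strip()
--     if 'elset' in kw:
--         element_set_name = kw['elset'][1].strip()
--
--     if element_set_name:
--         if element_set_name not in cell_sets:
--             cell_sets[element_set_name] = set()
--
--     return element_type, element_set_name
-- ===== Notes on version B (the rewrite author's own statement) =====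
-- stated objective: alternative
-- what changed: B replaces A's in-loop branch-and-assign accumulation by building a keyword dict in one pass and deriving element_type/element_set_name from the dict afterwards (last occurrence wins either way).
-- outside the precondition, e.g. on _read_element_keywords({}, ['*ELEMENT', 'type']): A raises IndexError, B raises IndexError
import Mathlib
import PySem

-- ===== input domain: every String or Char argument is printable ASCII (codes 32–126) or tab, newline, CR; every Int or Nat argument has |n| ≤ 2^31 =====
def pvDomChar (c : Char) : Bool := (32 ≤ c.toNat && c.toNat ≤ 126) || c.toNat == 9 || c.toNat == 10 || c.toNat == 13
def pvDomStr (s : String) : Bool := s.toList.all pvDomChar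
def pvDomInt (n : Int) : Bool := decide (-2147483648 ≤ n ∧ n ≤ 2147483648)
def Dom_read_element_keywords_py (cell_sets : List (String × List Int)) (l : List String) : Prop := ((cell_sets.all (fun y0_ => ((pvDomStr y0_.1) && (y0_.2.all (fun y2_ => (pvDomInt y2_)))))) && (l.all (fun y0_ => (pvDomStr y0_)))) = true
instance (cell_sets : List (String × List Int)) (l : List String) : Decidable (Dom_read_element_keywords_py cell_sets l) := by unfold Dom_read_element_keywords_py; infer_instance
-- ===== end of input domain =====

-- B builds a keyword dict in one pass and derives both results from it afterwards (alternative
-- decomposition, same cost). Equivalence is about the RETURN value; A's (and B's identical)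
-- in-place addition of an empty set to cell_sets is not modelled.


-- shared sub-expressions of both Pythons: key_parts[0].lower().strip(), key_parts[1].lower().strip(),
-- key_parts[1].strip(); the `.getD ""` default is only reached on the IndexError inputs Pre_ excludes
def pvKeyName (key_parts : List String) : String :=
  PySem.Str.strip (PySem.Str.lower ((PySem.List.pyGet? key_parts 0).getD ""))
def pvValT (key_parts : List String) : String :=
  PySem.Str.strip (PySem.Str.lower ((PySem.List.pyGet? key_parts 1).getD ""))
def pvValS (key_parts : List String) : String :=
  PySem.Str.strip ((PySem.List.pyGet? key_parts 1).getD "")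

-- ===== PORT A =====
-- loop bodies of each Python, as named helpers; l[1:] is l.drop 1 (exact)
def pvStepA (st : Option String × Option String) (key : String) : Option String × Option String :=
  let key_parts := (PySem.Str.split? key "=").getD []
  let key_name := pvKeyName key_parts
  if key_name = "type" then (some (pvValT key_parts), st.2)
  else if key_name = "elset" then (st.1, some (pvValS key_parts))
  else st

def read_element_keywords_py (cell_sets : List (String × List Int)) (l : List String) : Option String × Option String :=
  (l.drop 1).foldl pvStepA (none, none)

-- ===== PORT B =====
def pvStepB (d : PySem.Dict String (List String)) (key : String) : PySem.Dict String (List String) :=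
  let parts := (PySem.Str.split? key "=").getD []
  d.insert (pvKeyName parts) parts

def read_element_keywords_py_alt (cell_sets : List (String × List Int)) (l : List String) : Option String × Option String :=
  let kw := (l.drop 1).foldl pvStepB PySem.Dict.empty
  ((kw.get? "type").map pvValT, (kw.get? "elset").map pvValS)

-- ===== PRECONDITION & SPEC =====
-- Pre_ excludes exactly the inputs where Python A raises IndexError: a 'type'/'elset' keyword with no '='
def Pre_read_element_keywords_py (cell_sets : List (String × List Int)) (l : List String) : Prop :=
  ∀ key ∈ l.drop 1,
    (pvKeyName ((PySem.Str.split? key "=").getD []) = "type" ∨ pvKeyName ((PySem.Str.split? key "=").getD []) = "elset") →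
    2 ≤ ((PySem.Str.split? key "=").getD []).length
instance (cell_sets : List (String × List Int)) (l : List String) : Decidable (Pre_read_element_keywords_py cell_sets l) := by unfold Pre_read_element_keywords_py; infer_instance

def pvWitness_read_element_keywords_py : (List (String × List Int)) × List String :=
  ([("S1", [1, 2])], ["*ELEMENT", "TYPE=C3D4", "Elset= Part-1 "])

def Spec_read_element_keywords_py (cell_sets : List (String × List Int)) (l : List String) (out : Option String × Option String) : Prop := out = read_element_keywords_py_alt cell_sets l
instance (cell_sets : List (String × List Int)) (l : List String) (out : Option String × Option String) : Decidable (Spec_read_element_keywords_py cell_sets l out) := by unfold Spec_read_element_keywords_py; infer_instance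

-- ===== CLAIM (what is proved, stated in full; the proofs are below) =====
def Claim_equal_read_element_keywords_py : Prop := ∀ (cell_sets : List (String × List Int)) (l : List String), Dom_read_element_keywords_py cell_sets l → Pre_read_element_keywords_py cell_sets l → Spec_read_element_keywords_py cell_sets l (read_element_keywords_py cell_sets l)

-- ===== LEMMAS AND PROOFS =====

theorem pvWitness_ok :
    Dom_read_element_keywords_py pvWitness_read_element_keywords_py.1 pvWitness_read_element_keywords_py.2 ∧
    Pre_read_element_keywords_py pvWitness_read_element_keywords_py.1 pvWitness_read_element_keywords_py.2 := by
  decide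

-- one step of A's loop is the corresponding pair of lookups after one step of B's loop
theorem pvStep_comm (d : PySem.Dict String (List String)) (key : String) :
    pvStepA ((d.get? "type").map pvValT, (d.get? "elset").map pvValS) key
    = (((pvStepB d key).get? "type").map pvValT, ((pvStepB d key).get? "elset").map pvValS) := by
  simp only [pvStepA, pvStepB]
  by_cases ht : pvKeyName ((PySem.Str.split? key "=").getD []) = "type"
  · simp [ht, PySem.Dict.get?_insert_self,
      PySem.Dict.get?_insert_of_ne d _ (show ("elset" : String) ≠ "type" by decide)]
  · by_cases hs : pvKeyName ((PySem.Str.split? key "=").getD []) = "elset"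
    · simp [hs, PySem.Dict.get?_insert_self,
        PySem.Dict.get?_insert_of_ne d _ (show ("type" : String) ≠ "elset" by decide)]
    · have h1 : ("type" : String) ≠ pvKeyName ((PySem.Str.split? key "=").getD []) :=
        fun h => ht h.symm
      have h2 : ("elset" : String) ≠ pvKeyName ((PySem.Str.split? key "=").getD []) :=
        fun h => hs h.symm
      simp [ht, hs, PySem.Dict.get?_insert_of_ne d _ h1, PySem.Dict.get?_insert_of_ne d _ h2]

-- loop invariant: A's accumulators are the two lookups in B's dict, for any start dict
theorem pvLoop (keys : List String) (d : PySem.Dict String (List String)) :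
    keys.foldl pvStepA ((d.get? "type").map pvValT, (d.get? "elset").map pvValS)
    = (((keys.foldl pvStepB d).get? "type").map pvValT,
       ((keys.foldl pvStepB d).get? "elset").map pvValS) := by
  induction keys generalizing d with
  | nil => rfl
  | cons key rest ih =>
    simp only [List.foldl_cons, pvStep_comm d key]
    exact ih (pvStepB d key)

-- ===== VERDICT (by name: the statement is the Claim_ definition above) =====
theorem read_element_keywords_py_spec : Claim_equal_read_element_keywords_py := by
  intro cell_sets l _ _
  unfold Spec_read_element_keywords_py read_element_keywords_py read_element_keywords_py_alt
  have h := pvLoop (l.drop 1) PySem.Dict.empty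
  simpa [PySem.Dict.get?_empty] using h
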